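-- pv_equiv track=rewrite | github.com/vucml/online_experiments | experiments/block_cat/block_cat.py | generate_alternating_recalls
-- ===== SOURCE A (Python) =====
-- def generate_alternating_recalls(
--     cue_count: int, total_recalls: int, cued_indices: list[int]
-- ) -> list[int]:
--     """Create an alternating sequence of cued recall and free recall events.
--
--     Args:
--         cue_count: The number of cued recall events.
--         total_recalls: The total number of recall events (both cued and free recall).
--         cued_indices: A list of indices for cued recall events.
--
--     Returns:
--         A list of recall event indices where cued recall indices alternate with free recall events (-1).
--     """
--     alternating_indices = []
--     cued_idx = 0
--     for i in range(total_recalls):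
--         if i % 2 == 0 and cued_idx < cue_count:
--             alternating_indices.append(cued_indices[cued_idx])
--             cued_idx += 1
--         else:
--             alternating_indices.append(-1)  # Free recall event
--     return alternating_indices
-- ===== SOURCE B (Python) =====
-- def generate_alternating_recalls(
--     cue_count: int, total_recalls: int, cued_indices: list[int]
-- ) -> list[int]:
--     result = [-1] * total_recalls
--     for j in range(min(cue_count, (total_recalls + 1) // 2)):
--         result[2 * j] = cued_indices[j]
--     return result
-- ===== Notes on version B (the rewrite author's own statement) =====
-- stated objective: alternative
-- what changed: B pre-allocates the full free-recall list of -1s and writes each cued index directly at its arithmetically computed even slot 2*j, instead of scanning every recall position with a modulo test and a running cued counter.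
import Mathlib
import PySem

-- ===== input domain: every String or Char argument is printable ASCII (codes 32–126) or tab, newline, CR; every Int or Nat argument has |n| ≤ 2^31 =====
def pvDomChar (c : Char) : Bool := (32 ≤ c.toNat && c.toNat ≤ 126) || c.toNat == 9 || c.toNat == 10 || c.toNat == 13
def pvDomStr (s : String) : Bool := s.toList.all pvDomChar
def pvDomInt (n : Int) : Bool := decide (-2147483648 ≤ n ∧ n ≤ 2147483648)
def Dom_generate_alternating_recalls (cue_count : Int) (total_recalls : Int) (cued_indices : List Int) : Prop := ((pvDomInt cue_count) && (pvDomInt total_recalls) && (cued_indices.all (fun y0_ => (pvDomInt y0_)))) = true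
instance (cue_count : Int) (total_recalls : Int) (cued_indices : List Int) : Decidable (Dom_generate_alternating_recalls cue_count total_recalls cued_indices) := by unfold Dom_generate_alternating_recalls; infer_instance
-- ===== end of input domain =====

-- B pre-allocates the full list of -1 free-recall markers and writes each cued index at slot 2*j
-- directly, instead of A's scan of every recall position with a modulo test and a running counter.

-- ===== PORT A =====
-- literal port of A: loop over range(total_recalls) with state (accumulated list, cued_idx);
-- cued_indices[cued_idx] is in range under Pre_ (pyGetD's default is never the result there).
def generate_alternating_recalls (cue_count : Int) (total_recalls : Int) (cued_indices : List Int) : List Int :=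
  ((PySem.List.pyRange 0 total_recalls 1).foldl
    (fun (st : List Int × Int) i =>
      if PySem.Int.mod i 2 = 0 ∧ st.2 < cue_count then
        (st.1 ++ [PySem.List.pyGetD cued_indices st.2 0], st.2 + 1)
      else
        (st.1 ++ [-1], st.2))
    ([], 0)).1

-- ===== PORT B =====
-- literal port of Source B: result = [-1]*total_recalls; for j in range(min(cue_count,(total_recalls+1)//2)): result[2*j] = cued_indices[j]
def generate_alternating_recalls_alt (cue_count : Int) (total_recalls : Int) (cued_indices : List Int) : List Int :=
  (PySem.List.pyRange 0 (min cue_count (PySem.Int.floordiv (total_recalls + 1) 2)) 1).foldl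
    (fun result j => result.set (2 * j).toNat (PySem.List.pyGetD cued_indices j 0))
    (List.replicate total_recalls.toNat (-1))

-- ===== PRECONDITION & SPEC =====
-- Pre_ excludes exactly the inputs where A raises IndexError (more cued slots demanded than cued_indices has).
def Pre_generate_alternating_recalls (cue_count : Int) (total_recalls : Int) (cued_indices : List Int) : Prop :=
  min cue_count (PySem.Int.floordiv (total_recalls + 1) 2) ≤ (cued_indices.length : Int)
instance (cue_count : Int) (total_recalls : Int) (cued_indices : List Int) : Decidable (Pre_generate_alternating_recalls cue_count total_recalls cued_indices) := by unfold Pre_generate_alternating_recalls; infer_instance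
def pvWitness_generate_alternating_recalls : Int × Int × List Int := (2, 5, [7, 9])

def Spec_generate_alternating_recalls (cue_count : Int) (total_recalls : Int) (cued_indices : List Int) (out : List Int) : Prop := out = generate_alternating_recalls_alt cue_count total_recalls cued_indices
instance (cue_count : Int) (total_recalls : Int) (cued_indices : List Int) (out : List Int) : Decidable (Spec_generate_alternating_recalls cue_count total_recalls cued_indices out) := by unfold Spec_generate_alternating_recalls; infer_instance

-- ===== CLAIM (what is proved, stated in full; the proofs are below) =====
def Claim_equal_generate_alternating_recalls : Prop := ∀ (cue_count : Int) (total_recalls : Int) (cued_indices : List Int), Dom_generate_alternating_recalls cue_count total_recalls cued_indices → Pre_generate_alternating_recalls cue_count total_recalls cued_indices → Spec_generate_alternating_recalls cue_count total_recalls cued_indices (generate_alternating_recalls cue_count total_recalls cued_indices)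

-- ===== LEMMAS AND PROOFS =====

-- the common shape both sides are reduced to, parametrised by the bound governing which even slots are cued
def pvShape (cued_indices : List Int) (n j : Nat) : List Int :=
  (List.range n).map (fun i => if i % 2 = 0 ∧ i / 2 < j then PySem.List.pyGetD cued_indices ((i / 2 : Nat) : Int) 0 else -1)

lemma pvRange_zero (t : Int) : PySem.List.pyRange 0 t 1 = List.map (fun k : Nat => (k : Int)) (List.range t.toNat) := by
  by_cases h : 0 ≤ t
  · have : t = ((t.toNat : Nat) : Int) := by omega
    rw [this, PySem.List.pyRange_zero_natCast, Int.toNat_natCast]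
  · have h0 : t.toNat = 0 := by omega
    rw [h0]
    simp [PySem.List.pyRange]
    omega

lemma pvA_invariant (cue_count : Int) (cued_indices : List Int) (n : Nat) :
    (List.map (fun k : Nat => (k : Int)) (List.range n)).foldl
      (fun (st : List Int × Int) i =>
        if PySem.Int.mod i 2 = 0 ∧ st.2 < cue_count then
          (st.1 ++ [PySem.List.pyGetD cued_indices st.2 0], st.2 + 1)
        else
          (st.1 ++ [-1], st.2))
      ([], 0)
    = (pvShape cued_indices n (min ((n + 1) / 2) cue_count.toNat),
       ((min ((n + 1) / 2) cue_count.toNat : Nat) : Int)) := by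
  induction n with
  | zero => simp [pvShape]
  | succ m ih =>
    rw [List.range_succ]
    simp only [List.map_append, List.map_cons, List.map_nil, List.foldl_append, List.foldl_cons, List.foldl_nil]
    rw [ih]
    have hmod : PySem.Int.mod (m : Int) 2 = ((m % 2 : Nat) : Int) := PySem.Int.mod_natCast m 2
    by_cases he : m % 2 = 0
    · by_cases hk : ((min ((m + 1) / 2) cue_count.toNat : Nat) : Int) < cue_count
      · rw [if_pos ⟨by rw [hmod, he]; rfl, hk⟩]
        have h1 : min ((m + 1 + 1) / 2) cue_count.toNat = min ((m + 1) / 2) cue_count.toNat + 1 := by omega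
        have h2 : min ((m + 1) / 2) cue_count.toNat = m / 2 := by omega
        refine Prod.ext ?_ (by simp [h1])
        simp only [h1, pvShape, List.range_succ, List.map_append, List.map_cons, List.map_nil]
        congr 1
        · apply List.map_congr_left
          intro i hi
          have hi' : i < m := List.mem_range.mp hi
          by_cases hc : i % 2 = 0 ∧ i / 2 < min ((m + 1) / 2) cue_count.toNat + 1
          · rw [if_pos hc, if_pos ⟨hc.1, by omega⟩]
          · rw [if_neg hc, if_neg (by intro ⟨a, b⟩; exact hc ⟨a, by omega⟩)]
        · rw [if_pos ⟨he, by omega⟩, h2]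
      · rw [if_neg (by intro ⟨_, h⟩; exact hk h)]
        have h1 : min ((m + 1 + 1) / 2) cue_count.toNat = min ((m + 1) / 2) cue_count.toNat := by omega
        refine Prod.ext ?_ (by simp [h1])
        simp only [h1, pvShape, List.range_succ, List.map_append, List.map_cons, List.map_nil]
        congr 1
        rw [if_neg (by intro ⟨_, h⟩; omega)]
    · rw [if_neg (by intro ⟨h, _⟩; rw [hmod] at h; omega)]
      have h1 : min ((m + 1 + 1) / 2) cue_count.toNat = min ((m + 1) / 2) cue_count.toNat := by omega
      refine Prod.ext ?_ (by simp [h1])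
      simp only [h1, pvShape, List.range_succ, List.map_append, List.map_cons, List.map_nil]
      congr 1
      rw [if_neg (by intro ⟨h, _⟩; omega)]

-- B's fold of index-2j writes, after j steps, is exactly pvShape _ n j (provided 2*(j-1) < n at each step)
lemma pvB_fold (cued_indices : List Int) (n j : Nat) (hj : 2 * j ≤ n + 1) :
    (List.map (fun k : Nat => (k : Int)) (List.range j)).foldl
      (fun result i => result.set (2 * i).toNat (PySem.List.pyGetD cued_indices i 0))
      (List.replicate n (-1))
    = pvShape cued_indices n j := by
  induction j with
  | zero =>
    apply List.ext_getElem (by simp [pvShape])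
    intro i h1 h2
    simp [pvShape]
  | succ m ih =>
    rw [List.range_succ]
    simp only [List.map_append, List.map_cons, List.map_nil, List.foldl_append, List.foldl_cons, List.foldl_nil]
    rw [ih (by omega)]
    have h2m : ((2 * (m : Int)).toNat) = 2 * m := by omega
    rw [h2m]
    apply List.ext_getElem (by simp [pvShape])
    intro i h1 h2
    simp only [pvShape, List.getElem_set, List.getElem_map, List.getElem_range] at *
    by_cases hi : 2 * m = i
    · rw [if_pos hi]
      have : i % 2 = 0 ∧ i / 2 < m + 1 := by omega
      rw [if_pos this]
      have : i / 2 = m := by omega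
      rw [this]
    · rw [if_neg hi]
      by_cases hc : i % 2 = 0 ∧ i / 2 < m
      · rw [if_pos hc, if_pos ⟨hc.1, by omega⟩]
      · rw [if_neg hc, if_neg (by intro ⟨a, b⟩; exact hc ⟨a, by omega⟩)]

-- ===== VERDICT (by name: the statement is the Claim_ definition above) =====
theorem generate_alternating_recalls_spec : Claim_equal_generate_alternating_recalls := by
  intro cue_count total_recalls cued_indices _ hpre
  unfold Spec_generate_alternating_recalls
  unfold generate_alternating_recalls generate_alternating_recalls_alt
  set m : Int := min cue_count (PySem.Int.floordiv (total_recalls + 1) 2) with hm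
  rw [pvRange_zero, pvRange_zero, pvA_invariant, pvB_fold]
  · -- the two shapes agree: for i < total_recalls.toNat, i/2 < min((n+1)/2) cue_count.toNat ↔ i/2 < m.toNat
    unfold pvShape
    apply List.map_congr_left
    intro i hi
    have hi' : i < total_recalls.toNat := List.mem_range.mp hi
    have hfd : PySem.Int.floordiv (total_recalls + 1) 2 = (total_recalls + 1) / 2 :=
      PySem.Int.floordiv_eq_ediv_of_pos (by omega)
    have hmt : m.toNat = min ((total_recalls.toNat + 1) / 2) cue_count.toNat := by
      rw [hm, hfd]; omega
    by_cases hc : i % 2 = 0 ∧ i / 2 < min ((total_recalls.toNat + 1) / 2) cue_count.toNat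
    · rw [if_pos hc, if_pos ⟨hc.1, by omega⟩]
    · rw [if_neg hc, if_neg (by intro ⟨a, b⟩; exact hc ⟨a, by omega⟩)]
  · -- the loop never writes past the end: 2 * m.toNat ≤ total_recalls.toNat + 1
    have hfd : PySem.Int.floordiv (total_recalls + 1) 2 = (total_recalls + 1) / 2 :=
      PySem.Int.floordiv_eq_ediv_of_pos (by omega)
    rw [hm, hfd]
    omega
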